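-- pv_equiv track=rewrite | github.com/cctbx/cctbx_project | mmtbx/ncs/restraints.py | match_ordered_chain_members
-- ===== SOURCE A (Python) =====
-- def match_ordered_chain_members(a, b):
--   result = []
--   na = len(a)
--   if (na == 0): return result
--   nb = len(b)
--   if (nb == 0): return result
--   ia = 0
--   ib = 0
--   while True:
--     ja = ia
--     jb = ib
--     while True:
--       if (a[ia] == b[jb]):
--         result.append((ia, jb))
--         ib = jb
--         break
--       elif (jb != ib and b[ib] == a[ja]):
--         result.append((ja, ib))
--         ia = ja
--         break
--       else:
--         ja += 1
--         if (ja == na):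
--           while True:
--             jb += 1
--             if (jb == nb): break
--             if (a[ia] == b[jb]):
--               result.append((ia, jb))
--               ib = jb
--               break
--           break
--         jb += 1
--         if (jb == nb):
--           while True:
--             if (b[ib] == a[ja]):
--               result.append((ja, ib))
--               ia = ja
--               break
--             ja += 1
--             if (ja == na): break
--           break
--     ia += 1
--     if (ia == na): break
--     ib += 1
--     if (ib == nb): break
--   return result
-- ===== SOURCE B (Python) =====
-- from bisect import bisect_left, insort  # insort unused; bisect_left only
--
-- def match_ordered_chain_members(a, b):
--   # Index each value -> sorted list of its positions, once per sequence;
--   # each greedy step then finds the nearest reappearance by binary search.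
--   pos_a = {}
--   for i, v in enumerate(a):
--     pos_a.setdefault(v, []).append(i)
--   pos_b = {}
--   for j, v in enumerate(b):
--     pos_b.setdefault(v, []).append(j)
--   na, nb = len(a), len(b)
--   result = []
--   ia = ib = 0
--   while ia < na and ib < nb:
--     occ_b = pos_b.get(a[ia], [])
--     k = bisect_left(occ_b, ib)
--     jb = occ_b[k] if k < len(occ_b) else None     # next b[jb] == a[ia], jb >= ib
--     occ_a = pos_a.get(b[ib], [])
--     k = bisect_left(occ_a, ia + 1)
--     ja = occ_a[k] if k < len(occ_a) else None     # next a[ja] == b[ib], ja > ia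
--     if jb is not None and (ja is None or jb - ib <= ja - ia):
--       result.append((ia, jb))
--       ia, ib = ia + 1, jb + 1
--     elif ja is not None:
--       result.append((ja, ib))
--       ia, ib = ja + 1, ib + 1
--     else:
--       ia, ib = ia + 1, ib + 1
--   return result
-- ===== Notes on version B (the rewrite author's own statement) =====
-- stated objective: faster
-- what changed: A finds each next match by a simultaneous diagonal scan of both sequences (with two one-sided tail scans), giving O(na*nb); B pre-indexes each value's sorted positions in both sequences once and finds the nearest reappearance on each side by binary search (bisect_left), picking the closer one with A's tie rule.
import Mathlib
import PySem

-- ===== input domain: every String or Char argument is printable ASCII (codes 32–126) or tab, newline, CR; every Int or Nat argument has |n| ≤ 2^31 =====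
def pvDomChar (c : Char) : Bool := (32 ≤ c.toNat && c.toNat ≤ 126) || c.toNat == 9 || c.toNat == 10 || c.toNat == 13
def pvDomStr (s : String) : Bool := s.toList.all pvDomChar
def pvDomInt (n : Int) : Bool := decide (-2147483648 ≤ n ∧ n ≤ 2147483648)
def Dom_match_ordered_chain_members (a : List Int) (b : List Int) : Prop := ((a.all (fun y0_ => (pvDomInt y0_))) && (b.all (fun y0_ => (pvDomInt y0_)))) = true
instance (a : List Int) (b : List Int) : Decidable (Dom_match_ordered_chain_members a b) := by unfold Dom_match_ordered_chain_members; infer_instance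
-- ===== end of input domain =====

-- ===== PORT A =====
-- B replaces A's O(na*nb) diagonal rescans with a one-time value→sorted-positions index
-- queried by binary search per step (objective: faster; equal return values proved below).
-- A scans both sequences diagonally from (ia, ib) for the nearest reappearance of
-- a[ia] in b or of b[ib] in a, with one-sided tail scans when one side runs out.
-- Loops are ported with an explicit fuel that provably suffices (totality guard only).

-- tail loop entered when ja reached na: scan b upward from jb+1 for a[ia]
def pvScanB (a b : List Int) (nb ia jb : Int) (fuel : Nat) : Option Int :=
  match fuel with
  | 0 => none
  | f + 1 =>
    let jb := jb + 1
    if jb = nb then none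
    else if PySem.List.pyGetD a ia 0 = PySem.List.pyGetD b jb 0 then some jb
    else pvScanB a b nb ia jb f

-- tail loop entered when jb reached nb: scan a from ja for b[ib]
def pvScanA (a b : List Int) (na ib ja : Int) (fuel : Nat) : Option Int :=
  match fuel with
  | 0 => none
  | f + 1 =>
    if PySem.List.pyGetD b ib 0 = PySem.List.pyGetD a ja 0 then some ja
    else
      let ja := ja + 1
      if ja = na then none else pvScanA a b na ib ja f

-- the inner `while True` loop: returns (appended match if any, new ia, new ib)
def pvInner (a b : List Int) (na nb ia ib ja jb : Int) (fuel : Nat) :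
    Option (Int × Int) × Int × Int :=
  match fuel with
  | 0 => (none, ia, ib)
  | f + 1 =>
    if PySem.List.pyGetD a ia 0 = PySem.List.pyGetD b jb 0 then (some (ia, jb), ia, jb)
    else if jb ≠ ib ∧ PySem.List.pyGetD b ib 0 = PySem.List.pyGetD a ja 0 then
      (some (ja, ib), ja, ib)
    else
      let ja := ja + 1
      if ja = na then
        match pvScanB a b nb ia jb (nb - jb).toNat with
        | some jb' => (some (ia, jb'), ia, jb')
        | none => (none, ia, ib)
      else
        let jb := jb + 1
        if jb = nb then
          match pvScanA a b na ib ja (na - ja).toNat with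
          | some ja' => (some (ja', ib), ja', ib)
          | none => (none, ia, ib)
        else pvInner a b na nb ia ib ja jb f

-- the outer `while True` loop
def pvOuter (a b : List Int) (na nb ia ib : Int) (acc : List (Int × Int)) (fuel : Nat) :
    List (Int × Int) :=
  match fuel with
  | 0 => acc
  | f + 1 =>
    let r := pvInner a b na nb ia ib ia ib (na - ia).toNat
    let acc := match r.1 with
      | some p => acc ++ [p]
      | none => acc
    let ia := r.2.1 + 1
    if ia = na then acc
    else
      let ib := r.2.2 + 1
      if ib = nb then acc
      else pvOuter a b na nb ia ib acc f

def match_ordered_chain_members (a : List Int) (b : List Int) : List (Int × Int) :=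
  let na : Int := a.length
  if na = 0 then []
  else
    let nb : Int := b.length
    if nb = 0 then []
    else pvOuter a b na nb 0 0 [] a.length

-- ===== PORT B =====
-- B indexes each value's positions once (pos_a / pos_b) and per step binary-searches
-- (bisect_left) the nearest reappearance on each side; fuel is a totality guard only.

-- pos = {}; for i, v in enumerate(l): pos.setdefault(v, []).append(i)
def pvPosDict (l : List Int) : PySem.Dict Int (List Int) :=
  (PySem.List.enumerate l).foldl (fun d p => d.modify p.2 [] (· ++ [p.1])) PySem.Dict.empty

-- while ia < na and ib < nb: ...
def pvBLoop (a b : List Int) (na nb : Int) (pa pb : PySem.Dict Int (List Int))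
    (ia ib : Int) (acc : List (Int × Int)) (fuel : Nat) : List (Int × Int) :=
  match fuel with
  | 0 => acc
  | f + 1 =>
    if ia < na ∧ ib < nb then
      let occB := pb.getD (PySem.List.pyGetD a ia 0) []
      let k := PySem.List.bisectLeft occB ib
      let jb? := if k < occB.length then some (occB.getD k 0) else none
      let occA := pa.getD (PySem.List.pyGetD b ib 0) []
      let k' := PySem.List.bisectLeft occA (ia + 1)
      let ja? := if k' < occA.length then some (occA.getD k' 0) else none
      match jb?, ja? with
      | some jb, some ja =>
        if jb - ib ≤ ja - ia then pvBLoop a b na nb pa pb (ia + 1) (jb + 1) (acc ++ [(ia, jb)]) f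
        else pvBLoop a b na nb pa pb (ja + 1) (ib + 1) (acc ++ [(ja, ib)]) f
      | some jb, none => pvBLoop a b na nb pa pb (ia + 1) (jb + 1) (acc ++ [(ia, jb)]) f
      | none, some ja => pvBLoop a b na nb pa pb (ja + 1) (ib + 1) (acc ++ [(ja, ib)]) f
      | none, none => pvBLoop a b na nb pa pb (ia + 1) (ib + 1) acc f
    else acc

def match_ordered_chain_members_alt (a : List Int) (b : List Int) : List (Int × Int) :=
  let pa := pvPosDict a
  let pb := pvPosDict b
  pvBLoop a b a.length b.length pa pb 0 0 [] (a.length + 1)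

-- ===== PRECONDITION & SPEC =====
def Spec_match_ordered_chain_members (a : List Int) (b : List Int) (out : List (Int × Int)) : Prop := out = match_ordered_chain_members_alt a b
instance (a : List Int) (b : List Int) (out : List (Int × Int)) : Decidable (Spec_match_ordered_chain_members a b out) := by unfold Spec_match_ordered_chain_members; infer_instance

-- ===== CLAIM (what is proved, stated in full; the proofs are below) =====
def Claim_equal_match_ordered_chain_members : Prop := ∀ (a : List Int) (b : List Int), Dom_match_ordered_chain_members a b → Spec_match_ordered_chain_members a b (match_ordered_chain_members a b)

-- ===== LEMMAS AND PROOFS =====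

-- reference: first index j' ≥ j with l[j'] = v
def pvFirst (l : List Int) (v : Int) (j : Int) : Option Int :=
  if h : j < (l.length : Int) then
    if PySem.List.pyGetD l j 0 = v then some j else pvFirst l v (j + 1)
  else none
termination_by ((l.length : Int) - j).toNat
decreasing_by omega

-- reference single step of the greedy matching
def pvOutcome (a b : List Int) (ia ib : Int) : Option (Int × Int) × Int × Int :=
  match pvFirst b (PySem.List.pyGetD a ia 0) ib, pvFirst a (PySem.List.pyGetD b ib 0) (ia + 1) with
  | some jb, some ja =>
    if jb - ib ≤ ja - ia then (some (ia, jb), ia, jb) else (some (ja, ib), ja, ib)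
  | some jb, none => (some (ia, jb), ia, jb)
  | none, some ja => (some (ja, ib), ja, ib)
  | none, none => (none, ia, ib)

theorem pvFirst_ge_len {l : List Int} {v j : Int} (h : (l.length : Int) ≤ j) :
    pvFirst l v j = none := by
  unfold pvFirst; rw [dif_neg (by omega)]

theorem pvFirst_hit {l : List Int} {v j : Int} (h : j < (l.length : Int))
    (hv : PySem.List.pyGetD l j 0 = v) : pvFirst l v j = some j := by
  unfold pvFirst; rw [dif_pos h, if_pos hv]

theorem pvFirst_miss {l : List Int} {v j : Int} (h : j < (l.length : Int))
    (hv : PySem.List.pyGetD l j 0 ≠ v) : pvFirst l v j = pvFirst l v (j + 1) := by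
  conv_lhs => unfold pvFirst
  rw [dif_pos h, if_neg hv]

theorem pvFirst_some {l : List Int} {v j j' : Int} (h : pvFirst l v j = some j') :
    j ≤ j' ∧ j' < (l.length : Int) ∧ PySem.List.pyGetD l j' 0 = v ∧
      ∀ t, j ≤ t → t < j' → PySem.List.pyGetD l t 0 ≠ v := by
  induction j using pvFirst.induct l v with
  | case1 j hlt hv =>
    rw [pvFirst_hit hlt hv, Option.some_inj] at h
    subst h
    exact ⟨le_refl _, hlt, hv, fun t ht1 ht2 _ => by omega⟩
  | case2 j hlt hv ih =>
    rw [pvFirst_miss hlt hv] at h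
    obtain ⟨h1, h2, h3, h4⟩ := ih h
    refine ⟨by omega, h2, h3, fun t ht1 ht2 => ?_⟩
    rcases eq_or_lt_of_le ht1 with rfl | ht
    · exact hv
    · exact h4 t (by omega) ht2
  | case3 j hge =>
    rw [pvFirst_ge_len (by omega)] at h
    exact absurd h (by simp)

theorem pvFirst_none {l : List Int} {v j : Int} (h : pvFirst l v j = none) :
    ∀ t, j ≤ t → t < (l.length : Int) → PySem.List.pyGetD l t 0 ≠ v := by
  induction j using pvFirst.induct l v with
  | case1 j hlt hv => rw [pvFirst_hit hlt hv] at h; exact absurd h (by simp)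
  | case2 j hlt hv ih =>
    rw [pvFirst_miss hlt hv] at h
    intro t ht1 ht2
    rcases eq_or_lt_of_le ht1 with rfl | ht
    · exact hv
    · exact ih h t (by omega) ht2
  | case3 j hge => intro t ht1 ht2 _; omega
theorem pvScanB_eq (a b : List Int) (ia jb : Int) (hjb : jb < (b.length : Int)) :
    pvScanB a b (b.length : Int) ia jb ((b.length : Int) - jb).toNat =
      pvFirst b (PySem.List.pyGetD a ia 0) (jb + 1) := by
  generalize hfu : ((b.length : Int) - jb).toNat = fuel
  induction fuel generalizing jb with
  | zero => omega
  | succ f ih =>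
    simp only [pvScanB]
    by_cases h1 : jb + 1 = (b.length : Int)
    · rw [if_pos h1, pvFirst_ge_len (by omega)]
    · rw [if_neg h1]
      by_cases h2 : PySem.List.pyGetD a ia 0 = PySem.List.pyGetD b (jb + 1) 0
      · rw [if_pos h2, pvFirst_hit (by omega) h2.symm]
      · rw [if_neg h2, pvFirst_miss (by omega) (fun hc => h2 hc.symm)]
        exact ih (jb + 1) (by omega) (by omega)

theorem pvScanA_eq (a b : List Int) (ib ja : Int) (hja : ja < (a.length : Int)) :
    pvScanA a b (a.length : Int) ib ja ((a.length : Int) - ja).toNat =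
      pvFirst a (PySem.List.pyGetD b ib 0) ja := by
  generalize hfu : ((a.length : Int) - ja).toNat = fuel
  induction fuel generalizing ja with
  | zero => omega
  | succ f ih =>
    simp only [pvScanA]
    by_cases h2 : PySem.List.pyGetD b ib 0 = PySem.List.pyGetD a ja 0
    · rw [if_pos h2, pvFirst_hit hja h2.symm]
    · rw [if_neg h2, pvFirst_miss hja (fun hc => h2 hc.symm)]
      by_cases h1 : ja + 1 = (a.length : Int)
      · rw [if_pos h1, pvFirst_ge_len (by omega)]
      · rw [if_neg h1]
        exact ih (ja + 1) (by omega) (by omega)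
theorem pvInner_diag (a b : List Int) (ia ib ja jb : Int)
    (hja : ia < ja) (hdiag : jb - ib = ja - ia)
    (hna : ja < (a.length : Int)) (hnb : jb < (b.length : Int))
    (hexB : pvFirst b (PySem.List.pyGetD a ia 0) ib =
            pvFirst b (PySem.List.pyGetD a ia 0) jb)
    (hexA : pvFirst a (PySem.List.pyGetD b ib 0) (ia + 1) =
            pvFirst a (PySem.List.pyGetD b ib 0) ja) :
    pvInner a b (a.length : Int) (b.length : Int) ia ib ja jb ((a.length : Int) - ja).toNat =
      pvOutcome a b ia ib := by
  have H : ∀ (fuel : Nat) (ja jb : Int), ia < ja → jb - ib = ja - ia →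
      ja < (a.length : Int) → jb < (b.length : Int) →
      pvFirst b (PySem.List.pyGetD a ia 0) ib = pvFirst b (PySem.List.pyGetD a ia 0) jb →
      pvFirst a (PySem.List.pyGetD b ib 0) (ia + 1) = pvFirst a (PySem.List.pyGetD b ib 0) ja →
      ((a.length : Int) - ja).toNat = fuel →
      pvInner a b (a.length : Int) (b.length : Int) ia ib ja jb fuel = pvOutcome a b ia ib := by
    intro fuel
    induction fuel with
    | zero => intro ja jb h1 h2 h3 h4 h5 h6 hfu; omega
    | succ f ih =>
      intro ja jb hja hdiag hna hnb hexB hexA hfu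
      simp only [pvInner]
      by_cases h1 : PySem.List.pyGetD a ia 0 = PySem.List.pyGetD b jb 0
      · rw [if_pos h1]
        have hB : pvFirst b (PySem.List.pyGetD a ia 0) ib = some jb := by
          rw [hexB]; exact pvFirst_hit hnb h1.symm
        unfold pvOutcome
        rw [hB]
        cases hA : pvFirst a (PySem.List.pyGetD b ib 0) (ia + 1) with
        | none => rfl
        | some ja' =>
          rw [hexA] at hA
          obtain ⟨hle, _, _, _⟩ := pvFirst_some hA
          simp [show jb - ib ≤ ja' - ia by omega]
      · rw [if_neg h1]
        have hmissB : pvFirst b (PySem.List.pyGetD a ia 0) jb =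
            pvFirst b (PySem.List.pyGetD a ia 0) (jb + 1) :=
          pvFirst_miss hnb (fun hc => h1 hc.symm)
        by_cases h2 : jb ≠ ib ∧ PySem.List.pyGetD b ib 0 = PySem.List.pyGetD a ja 0
        · rw [if_pos h2]
          have hA : pvFirst a (PySem.List.pyGetD b ib 0) (ia + 1) = some ja := by
            rw [hexA]; exact pvFirst_hit hna h2.2.symm
          unfold pvOutcome
          rw [hA]
          cases hB : pvFirst b (PySem.List.pyGetD a ia 0) ib with
          | none => rfl
          | some jb' =>
            rw [hexB, hmissB] at hB
            obtain ⟨hle, _, _, _⟩ := pvFirst_some hB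
            simp [show ¬(jb' - ib ≤ ja - ia) by omega]
        · rw [if_neg h2]
          have h2' : PySem.List.pyGetD b ib 0 ≠ PySem.List.pyGetD a ja 0 := by
            intro hc; exact h2 ⟨by omega, hc⟩
          have hmissA : pvFirst a (PySem.List.pyGetD b ib 0) ja =
              pvFirst a (PySem.List.pyGetD b ib 0) (ja + 1) :=
            pvFirst_miss hna (fun hc => h2' hc.symm)
          by_cases h3 : ja + 1 = (a.length : Int)
          · rw [if_pos h3, pvScanB_eq a b ia jb hnb]
            have hA : pvFirst a (PySem.List.pyGetD b ib 0) (ia + 1) = none := by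
              rw [hexA, hmissA]; exact pvFirst_ge_len (by omega)
            unfold pvOutcome
            rw [hA, hexB, hmissB]
            cases pvFirst b (PySem.List.pyGetD a ia 0) (jb + 1) with
            | none => rfl
            | some jb' => rfl
          · rw [if_neg h3]
            by_cases h4 : jb + 1 = (b.length : Int)
            · rw [if_pos h4, pvScanA_eq a b ib (ja + 1) (by omega)]
              have hB : pvFirst b (PySem.List.pyGetD a ia 0) ib = none := by
                rw [hexB, hmissB]; exact pvFirst_ge_len (by omega)
              unfold pvOutcome
              rw [hB, hexA, hmissA]
              cases pvFirst a (PySem.List.pyGetD b ib 0) (ja + 1) with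
              | none => rfl
              | some ja' => rfl
            · rw [if_neg h4]
              exact ih (ja + 1) (jb + 1) (by omega) (by omega) (by omega) (by omega)
                (hexB.trans hmissB) (hexA.trans hmissA) (by omega)
  exact H _ ja jb hja hdiag hna hnb hexB hexA rfl
theorem pvInner_eq (a b : List Int) (ia ib : Int)
    (hia : ia < (a.length : Int)) (hib : ib < (b.length : Int)) :
    pvInner a b (a.length : Int) (b.length : Int) ia ib ia ib ((a.length : Int) - ia).toNat =
      pvOutcome a b ia ib := by
  have hf : ((a.length : Int) - ia).toNat = (((a.length : Int) - ia).toNat - 1) + 1 := by omega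
  rw [hf]
  simp only [pvInner]
  by_cases h1 : PySem.List.pyGetD a ia 0 = PySem.List.pyGetD b ib 0
  · rw [if_pos h1]
    have hB : pvFirst b (PySem.List.pyGetD a ia 0) ib = some ib := pvFirst_hit hib h1.symm
    unfold pvOutcome
    rw [hB]
    cases hA : pvFirst a (PySem.List.pyGetD b ib 0) (ia + 1) with
    | none => rfl
    | some ja' =>
      obtain ⟨hle, _, _, _⟩ := pvFirst_some hA
      simp
      omega
  · rw [if_neg h1, if_neg (fun (h : ib ≠ ib ∧ _) => h.1 rfl)]
    have hmissB : pvFirst b (PySem.List.pyGetD a ia 0) ib =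
        pvFirst b (PySem.List.pyGetD a ia 0) (ib + 1) :=
      pvFirst_miss hib (fun hc => h1 hc.symm)
    by_cases h3 : ia + 1 = (a.length : Int)
    · rw [if_pos h3, pvScanB_eq a b ia ib hib]
      have hA : pvFirst a (PySem.List.pyGetD b ib 0) (ia + 1) = none :=
        pvFirst_ge_len (by omega)
      unfold pvOutcome
      rw [hA, hmissB]
      cases pvFirst b (PySem.List.pyGetD a ia 0) (ib + 1) with
      | none => rfl
      | some jb' => rfl
    · rw [if_neg h3]
      by_cases h4 : ib + 1 = (b.length : Int)
      · rw [if_pos h4, pvScanA_eq a b ib (ia + 1) (by omega)]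
        have hB : pvFirst b (PySem.List.pyGetD a ia 0) ib = none := by
          rw [hmissB]; exact pvFirst_ge_len (by omega)
        unfold pvOutcome
        rw [hB]
        cases pvFirst a (PySem.List.pyGetD b ib 0) (ia + 1) with
        | none => rfl
        | some ja' => rfl
      · rw [if_neg h4]
        have hfu : (((a.length : Int) - ia).toNat - 1) = ((a.length : Int) - (ia + 1)).toNat := by
          omega
        rw [hfu]
        exact pvInner_diag a b ia ib (ia + 1) (ib + 1) (by omega) (by omega) (by omega)
          (by omega) hmissB rfl
theorem pvPosDict_getD (l : List Int) (v : Int) :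
    (pvPosDict l).getD v [] =
      ((((PySem.List.enumerate l).map Prod.swap).filter (fun (p : Int × Int) => p.1 == v)).map (·.2)) := by
  have h : pvPosDict l =
      ((PySem.List.enumerate l).map Prod.swap).foldl
        (fun d p => d.modify p.1 [] (· ++ [p.2])) PySem.Dict.empty := by
    rw [List.foldl_map]; rfl
  rw [h, PySem.Dict.getD_foldl_modify_append, PySem.Dict.getD_empty, List.nil_append]

theorem pvOcc_mem (l : List Int) (v j : Int) :
    j ∈ (pvPosDict l).getD v [] ↔
      0 ≤ j ∧ j < (l.length : Int) ∧ PySem.List.pyGetD l j 0 = v := by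
  rw [pvPosDict_getD]
  simp only [List.mem_map, List.mem_filter, List.mem_map, beq_iff_eq]
  constructor
  · rintro ⟨p, ⟨⟨q, hq, rfl⟩, hpv⟩, rfl⟩
    rw [PySem.List.mem_enumerate_iff] at hq
    obtain ⟨k, hk, rfl⟩ := hq
    simp only [Prod.swap_prod_mk] at hpv ⊢
    refine ⟨by omega, by omega, ?_⟩
    rw [show ((0 : Int) + k) = (k : Int) by omega, PySem.List.pyGetD_natCast,
      List.getD_eq_getElem l 0 hk]
    exact hpv
  · rintro ⟨h0, hlen, hv⟩
    refine ⟨(v, j), ⟨⟨(j, v), ?_, ?_⟩, rfl⟩, rfl⟩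
    · rw [PySem.List.mem_enumerate_iff]
      refine ⟨j.toNat, by omega, ?_⟩
      have : ((0 : Int) + j.toNat) = j := by omega
      rw [this]
      congr 1
      rw [← hv, PySem.List.pyGetD_eq_getElem l 0 h0 hlen]
    · rfl

theorem pvOcc_sorted (l : List Int) (v : Int) :
    ((pvPosDict l).getD v []).Pairwise (· ≤ ·) := by
  rw [pvPosDict_getD]
  rw [List.pairwise_map]
  have hp : ((PySem.List.enumerate l).map Prod.swap).Pairwise
      (fun (p q : Int × Int) => p.2 < q.2) := by
    rw [List.pairwise_map]
    exact (PySem.List.pairwise_lt_enumerate l 0).imp (fun h => by simpa using h)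
  exact List.Pairwise.imp (fun h => le_of_lt h) (hp.filter _)
theorem pvBisect_eq_first (l : List Int) (v x : Int) (hx : 0 ≤ x) :
    (if PySem.List.bisectLeft ((pvPosDict l).getD v []) x < ((pvPosDict l).getD v []).length
     then some (((pvPosDict l).getD v []).getD (PySem.List.bisectLeft ((pvPosDict l).getD v []) x) 0)
     else none) = pvFirst l v x := by
  obtain ⟨hk1, hk2, hk3⟩ :=
    PySem.List.bisectLeft_spec ((pvPosDict l).getD v []) x (pvOcc_sorted l v)
  cases hF : pvFirst l v x with
  | none =>
    rw [if_neg]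
    intro hlt
    have hmem := List.getElem_mem
      (l := (pvPosDict l).getD v []) (n := PySem.List.bisectLeft ((pvPosDict l).getD v []) x) hlt
    rw [pvOcc_mem] at hmem
    exact pvFirst_none hF _ (hk3 _ hlt (le_refl _)) hmem.2.1 hmem.2.2
  | some j' =>
    obtain ⟨hxj, hjlen, hjv, hmin⟩ := pvFirst_some hF
    have hjmem : j' ∈ (pvPosDict l).getD v [] := (pvOcc_mem l v j').mpr ⟨by omega, hjlen, hjv⟩
    obtain ⟨m, hm, hme⟩ := List.getElem_of_mem hjmem
    have hklt : PySem.List.bisectLeft ((pvPosDict l).getD v []) x <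
        ((pvPosDict l).getD v []).length := by
      by_contra hge
      have : m < PySem.List.bisectLeft ((pvPosDict l).getD v []) x := by omega
      have := hk2 m hm this
      omega
    rw [if_pos hklt, List.getD_eq_getElem _ _ hklt]
    have hkx := hk3 _ hklt (le_refl _)
    have hkmem := List.getElem_mem
      (l := (pvPosDict l).getD v []) (n := PySem.List.bisectLeft ((pvPosDict l).getD v []) x) hklt
    rw [pvOcc_mem] at hkmem
    have hge : j' ≤ ((pvPosDict l).getD v [])[PySem.List.bisectLeft ((pvPosDict l).getD v []) x] := by
      by_contra hlt2
      exact hmin _ hkx (by omega) hkmem.2.2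
    have hle : ((pvPosDict l).getD v [])[PySem.List.bisectLeft ((pvPosDict l).getD v []) x] ≤ j' := by
      have hkm : PySem.List.bisectLeft ((pvPosDict l).getD v []) x ≤ m := by
        by_contra hgt
        have := hk2 m hm (by omega)
        omega
      rcases eq_or_lt_of_le hkm with heq | hlt3
      · subst heq
        exact le_of_eq hme
      · rw [← hme]
        exact (List.pairwise_iff_getElem.mp (pvOcc_sorted l v)) _ _ _ hm hlt3
    rw [Option.some_inj]
    omega
theorem pvBLoop_stop (a b : List Int) (na nb : Int) (pa pb : PySem.Dict Int (List Int))
    (ia ib : Int) (acc : List (Int × Int)) (g : Nat) (h : ¬(ia < na ∧ ib < nb)) :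
    pvBLoop a b na nb pa pb ia ib acc g = acc := by
  cases g with
  | zero => rfl
  | succ g => simp only [pvBLoop]; rw [if_neg h]

theorem pvBLoop_step (a b : List Int) (ia ib : Int) (acc : List (Int × Int)) (g : Nat)
    (h0a : 0 ≤ ia) (h0b : 0 ≤ ib)
    (hia : ia < (a.length : Int)) (hib : ib < (b.length : Int)) :
    pvBLoop a b (a.length : Int) (b.length : Int) (pvPosDict a) (pvPosDict b) ia ib acc (g + 1) =
      (let r := pvOutcome a b ia ib
       pvBLoop a b (a.length : Int) (b.length : Int) (pvPosDict a) (pvPosDict b)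
         (r.2.1 + 1) (r.2.2 + 1)
         (match r.1 with | some p => acc ++ [p] | none => acc) g) := by
  simp only [pvBLoop]
  rw [if_pos ⟨hia, hib⟩]
  rw [pvBisect_eq_first b (PySem.List.pyGetD a ia 0) ib h0b,
      pvBisect_eq_first a (PySem.List.pyGetD b ib 0) (ia + 1) (by omega)]
  unfold pvOutcome
  cases pvFirst b (PySem.List.pyGetD a ia 0) ib with
  | none =>
    cases pvFirst a (PySem.List.pyGetD b ib 0) (ia + 1) with
    | none => rfl
    | some ja => rfl
  | some jb =>
    cases pvFirst a (PySem.List.pyGetD b ib 0) (ia + 1) with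
    | none => rfl
    | some ja =>
      by_cases htie : jb - ib ≤ ja - ia
      · simp [htie]
      · simp [htie]

theorem pvLoop_eq (a b : List Int) (f g : Nat) :
    ∀ (ia ib : Int) (acc : List (Int × Int)), 0 ≤ ia → 0 ≤ ib →
      ia < (a.length : Int) → ib < (b.length : Int) →
      ((a.length : Int) - ia).toNat ≤ f → ((a.length : Int) - ia).toNat ≤ g →
      pvOuter a b (a.length : Int) (b.length : Int) ia ib acc f =
        pvBLoop a b (a.length : Int) (b.length : Int) (pvPosDict a) (pvPosDict b) ia ib acc g := by
  induction f generalizing g with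
  | zero => intro ia ib acc h0a h0b hia hib hf hg; omega
  | succ f ih =>
    intro ia ib acc h0a h0b hia hib hf hg
    cases g with
    | zero => omega
    | succ g =>
      rw [pvBLoop_step a b ia ib acc g h0a h0b hia hib]
      simp only [pvOuter]
      rw [pvInner_eq a b ia ib hia hib]
      have hcont : ∀ (ia1 ib1 : Int) (acc1 : List (Int × Int)),
          0 ≤ ia1 → 0 ≤ ib1 → ia ≤ ia1 → ia1 < (a.length : Int) → ib1 < (b.length : Int) →
          (if ia1 + 1 = (a.length : Int) then acc1
           else if ib1 + 1 = (b.length : Int) then acc1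
           else pvOuter a b (a.length : Int) (b.length : Int) (ia1 + 1) (ib1 + 1) acc1 f) =
          pvBLoop a b (a.length : Int) (b.length : Int) (pvPosDict a) (pvPosDict b)
            (ia1 + 1) (ib1 + 1) acc1 g := by
        intro ia1 ib1 acc1 g0a g0b gle glt gble
        by_cases hstopA : ia1 + 1 = (a.length : Int)
        · rw [if_pos hstopA, pvBLoop_stop _ _ _ _ _ _ _ _ _ _ (by omega)]
        · rw [if_neg hstopA]
          by_cases hstopB : ib1 + 1 = (b.length : Int)
          · rw [if_pos hstopB, pvBLoop_stop _ _ _ _ _ _ _ _ _ _ (by omega)]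
          · rw [if_neg hstopB]
            exact ih g (ia1 + 1) (ib1 + 1) acc1 (by omega) (by omega) (by omega) (by omega)
              (by omega) (by omega)
      cases hB : pvFirst b (PySem.List.pyGetD a ia 0) ib with
      | none =>
        cases hA : pvFirst a (PySem.List.pyGetD b ib 0) (ia + 1) with
        | none =>
          have hO : pvOutcome a b ia ib = (none, ia, ib) := by
            unfold pvOutcome; rw [hB, hA]
          rw [hO]
          exact hcont ia ib acc h0a h0b (le_refl _) hia (by omega)
        | some ja =>
          obtain ⟨hja1, hja2, _, _⟩ := pvFirst_some hA
          have hO : pvOutcome a b ia ib = (some (ja, ib), ja, ib) := by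
            unfold pvOutcome; rw [hB, hA]
          rw [hO]
          exact hcont ja ib (acc ++ [(ja, ib)]) (by omega) h0b (by omega) hja2 (by omega)
      | some jb =>
        obtain ⟨hjb1, hjb2, _, _⟩ := pvFirst_some hB
        cases hA : pvFirst a (PySem.List.pyGetD b ib 0) (ia + 1) with
        | none =>
          have hO : pvOutcome a b ia ib = (some (ia, jb), ia, jb) := by
            unfold pvOutcome; rw [hB, hA]
          rw [hO]
          exact hcont ia jb (acc ++ [(ia, jb)]) h0a (by omega) (le_refl _) hia (by omega)
        | some ja =>
          obtain ⟨hja1, hja2, _, _⟩ := pvFirst_some hA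
          by_cases htie : jb - ib ≤ ja - ia
          · have hO : pvOutcome a b ia ib = (some (ia, jb), ia, jb) := by
              unfold pvOutcome; rw [hB, hA]; simp [htie]
            rw [hO]
            exact hcont ia jb (acc ++ [(ia, jb)]) h0a (by omega) (le_refl _) hia (by omega)
          · have hO : pvOutcome a b ia ib = (some (ja, ib), ja, ib) := by
              unfold pvOutcome; rw [hB, hA]; simp [htie]
            rw [hO]
            exact hcont ja ib (acc ++ [(ja, ib)]) (by omega) h0b (by omega) hja2 (by omega)

-- ===== VERDICT (by name: the statement is the Claim_ definition above) =====
theorem match_ordered_chain_members_spec : Claim_equal_match_ordered_chain_members := by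
  intro a b _
  unfold Spec_match_ordered_chain_members
  unfold match_ordered_chain_members match_ordered_chain_members_alt
  by_cases ha : (a.length : Int) = 0
  · rw [if_pos ha, pvBLoop_stop _ _ _ _ _ _ _ _ _ _ (by omega)]
  · rw [if_neg ha]
    by_cases hb : (b.length : Int) = 0
    · rw [if_pos hb, pvBLoop_stop _ _ _ _ _ _ _ _ _ _ (by omega)]
    · rw [if_neg hb]
      exact pvLoop_eq a b a.length (a.length + 1) 0 0 [] (le_refl _) (le_refl _)
        (by omega) (by omega) (by omega) (by omega)
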